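-- pv_equiv track=rewrite | github.com/Arsen1302/Code-copy-detector | TestData/solutions/problem_1604_2.py | solution_1604_2
-- ===== SOURCE A (Python) =====
-- from typing import List
--
-- def solution_1604_2(nums1: List[int], nums2: List[int]) -> int:
--     n = len(nums1)
--     diff = [0]*n
--     for i in range(n):
--         diff[i] = nums1[i]-nums2[i]
--     mpos,mneg,pos,neg = 0,0,0,0
--     for i in range(n):
--         pos += diff[i]
--         if pos < 0:
--             pos = 0
--         neg += diff[i]
--         if neg > 0:
--             neg = 0
--         mpos = max(pos,mpos)
--         mneg = min(neg,mneg)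
--     return max(sum(nums1)-mneg,sum(nums2)+mpos)
-- ===== SOURCE B (Python) =====
-- from typing import List
--
-- def solution_1604_2(nums1: List[int], nums2: List[int]) -> int:
--     # prefix-sum scan: track running prefix sum of nums1[i]-nums2[i] with its
--     # running min/max to get the best positive and negative subarray sums
--     cur = minPre = maxPre = mpos = mneg = 0
--     for a, b in zip(nums1, nums2):
--         d = a - b
--         cur += d
--         mpos = max(mpos, cur - minPre)
--         mneg = min(mneg, cur - maxPre)
--         minPre = min(minPre, cur)
--         maxPre = max(maxPre, cur)
--     return max(sum(nums1) - mneg, sum(nums2) + mpos)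
-- ===== Notes on version B (the rewrite author's own statement) =====
-- stated objective: alternative
-- what changed: Replaces the separate diff-array build plus Kadane reset-to-zero recurrence with a single pass over zipped inputs maintaining the running prefix sum and its running minimum/maximum to extract the best positive and negative subarray sums.
import Mathlib
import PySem

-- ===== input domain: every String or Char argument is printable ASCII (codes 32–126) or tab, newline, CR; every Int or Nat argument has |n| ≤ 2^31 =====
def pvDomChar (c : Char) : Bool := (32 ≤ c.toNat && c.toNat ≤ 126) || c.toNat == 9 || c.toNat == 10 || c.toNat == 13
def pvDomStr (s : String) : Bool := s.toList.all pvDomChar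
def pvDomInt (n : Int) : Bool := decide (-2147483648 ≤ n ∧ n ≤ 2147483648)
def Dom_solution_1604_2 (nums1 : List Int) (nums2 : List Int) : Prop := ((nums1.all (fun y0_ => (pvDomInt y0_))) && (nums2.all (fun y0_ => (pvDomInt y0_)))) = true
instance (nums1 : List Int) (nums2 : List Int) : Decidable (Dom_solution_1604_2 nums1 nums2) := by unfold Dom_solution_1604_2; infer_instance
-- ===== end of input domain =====

-- B replaces the diff-array build + Kadane reset recurrence by one prefix-sum scan with running extrema (alternative decomposition, same cost).

-- ===== PORT A =====
-- loop body of A's Kadane pass (mpos, mneg, pos, neg)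
def stepA (s : Int × Int × Int × Int) (dv : Int) : Int × Int × Int × Int :=
  let pos := s.2.2.1 + dv
  let pos := if pos < 0 then 0 else pos
  let neg := s.2.2.2 + dv
  let neg := if neg > 0 then 0 else neg
  (max pos s.1, min neg s.2.1, pos, neg)

def solution_1604_2 (nums1 : List Int) (nums2 : List Int) : Int :=
  let n : Int := PySem.List.len nums1
  -- diff = [0]*n then diff[i] = nums1[i]-nums2[i]; pyGetD/pySetD are exact under Pre_ (all indices in range)
  let diff := (PySem.List.pyRange 0 n 1).foldl
      (fun d i => PySem.List.pySetD d i (PySem.List.pyGetD nums1 i 0 - PySem.List.pyGetD nums2 i 0))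
      (List.replicate n.toNat 0)
  let st := (PySem.List.pyRange 0 n 1).foldl (fun s i => stepA s (PySem.List.pyGetD diff i 0)) (0, 0, 0, 0)
  max (nums1.sum - st.2.1) (nums2.sum + st.1)

-- ===== PORT B =====
-- loop body of B's prefix-sum scan (cur, minPre, maxPre, mpos, mneg)
def stepB (s : Int × Int × Int × Int × Int) (dv : Int) : Int × Int × Int × Int × Int :=
  let cur := s.1 + dv
  (cur, min s.2.1 cur, max s.2.2.1 cur, max s.2.2.2.1 (cur - s.2.1), min s.2.2.2.2 (cur - s.2.2.1))

def solution_1604_2_alt (nums1 : List Int) (nums2 : List Int) : Int :=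
  let st := (nums1.zip nums2).foldl (fun s ab => stepB s (ab.1 - ab.2)) (0, 0, 0, 0, 0)
  max (nums1.sum - st.2.2.2.2) (nums2.sum + st.2.2.2.1)

-- ===== PRECONDITION & SPEC =====
-- Pre_ excludes exactly the inputs where A raises IndexError: nums2 shorter than nums1 (A reads nums2[i] for every i < len(nums1)).
def Pre_solution_1604_2 (nums1 : List Int) (nums2 : List Int) : Prop := nums1.length ≤ nums2.length
instance (nums1 : List Int) (nums2 : List Int) : Decidable (Pre_solution_1604_2 nums1 nums2) := by unfold Pre_solution_1604_2; infer_instance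
def pvWitness_solution_1604_2 : List Int × List Int := ([1, -2, 3], [4, 0, -1])

def Spec_solution_1604_2 (nums1 : List Int) (nums2 : List Int) (out : Int) : Prop := out = solution_1604_2_alt nums1 nums2
instance (nums1 : List Int) (nums2 : List Int) (out : Int) : Decidable (Spec_solution_1604_2 nums1 nums2 out) := by unfold Spec_solution_1604_2; infer_instance

-- ===== CLAIM (what is proved, stated in full; the proofs are below) =====
def Claim_equal_solution_1604_2 : Prop := ∀ (nums1 : List Int) (nums2 : List Int), Dom_solution_1604_2 nums1 nums2 → Pre_solution_1604_2 nums1 nums2 → Spec_solution_1604_2 nums1 nums2 (solution_1604_2 nums1 nums2)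

-- ===== LEMMAS AND PROOFS =====

-- writing g i into slot i, left to right, of a list whose prefix is already final
lemma fold_set (g : Nat → Int) : ∀ (l pre : List Int),
    (List.range l.length).foldl (fun d j => d.set (pre.length + j) (g (pre.length + j))) (pre ++ l)
    = pre ++ (List.range l.length).map (fun j => g (pre.length + j)) := by
  intro l
  induction l with
  | nil => intro pre; simp
  | cons x l ih =>
    intro pre
    rw [List.length_cons, List.range_succ_eq_map]
    simp only [List.foldl_cons, List.foldl_map, List.map_cons, List.map_map, Nat.add_zero]
    have hset : (pre ++ x :: l).set pre.length (g pre.length) = (pre ++ [g pre.length]) ++ l := by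
      rw [List.set_append_right _ _ (Nat.le_refl _)]
      simp
    rw [hset]
    have hb : (fun (d : List Int) (j : Nat) => d.set (pre.length + Nat.succ j) (g (pre.length + Nat.succ j)))
        = fun (d : List Int) (j : Nat) => d.set ((pre ++ [g pre.length]).length + j) (g ((pre ++ [g pre.length]).length + j)) := by
      funext d j
      have h : pre.length + Nat.succ j = (pre ++ [g pre.length]).length + j := by
        simp; omega
      rw [h]
    rw [hb, ih (pre ++ [g pre.length])]
    simp only [List.append_assoc, List.cons_append, List.nil_append]
    congr 1
    congr 1
    apply List.map_congr_left
    intro j _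
    congr 1
    simp; omega

-- under Pre_, A's diff array is the elementwise difference of the zipped inputs
lemma diff_eq (nums1 nums2 : List Int) (h : nums1.length ≤ nums2.length) :
    (PySem.List.pyRange 0 (PySem.List.len nums1) 1).foldl
      (fun d i => PySem.List.pySetD d i (PySem.List.pyGetD nums1 i 0 - PySem.List.pyGetD nums2 i 0))
      (List.replicate (PySem.List.len nums1).toNat 0)
    = (nums1.zip nums2).map (fun ab => ab.1 - ab.2) := by
  rw [PySem.List.len_eq, PySem.List.pyRange_zero_natCast]
  simp only [List.foldl_map, PySem.List.pySetD_natCast, PySem.List.pyGetD_natCast, Int.toNat_natCast]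
  have h0 := fold_set (fun j => nums1.getD j 0 - nums2.getD j 0) (List.replicate nums1.length 0) []
  simp only [List.nil_append, List.length_nil, Nat.zero_add, List.length_replicate] at h0
  rw [h0]
  apply List.ext_getElem
  · simp; omega
  · intro i h1 h2
    simp only [List.getElem_map, List.getElem_range, List.getElem_zip]
    simp only [List.length_map, List.length_range] at h1
    rw [List.getD_eq_getElem _ _ (by omega), List.getD_eq_getElem _ _ (by omega)]

-- main loop invariant: A's Kadane state vs B's prefix-extrema state
lemma loop_eq : ∀ (d : List Int) (mpos mneg cur minPre maxPre : Int),
    minPre ≤ cur → cur ≤ maxPre → 0 ≤ mpos → mneg ≤ 0 →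
    (d.foldl stepA (mpos, mneg, cur - minPre, cur - maxPre)).1
        = (d.foldl stepB (cur, minPre, maxPre, mpos, mneg)).2.2.2.1 ∧
    (d.foldl stepA (mpos, mneg, cur - minPre, cur - maxPre)).2.1
        = (d.foldl stepB (cur, minPre, maxPre, mpos, mneg)).2.2.2.2 := by
  intro d
  induction d with
  | nil => intro mpos mneg cur minPre maxPre h1 h2 h3 h4; exact ⟨rfl, rfl⟩
  | cons dv d ih =>
    intro mpos mneg cur minPre maxPre h1 h2 h3 h4
    simp only [List.foldl_cons]
    have hA : stepA (mpos, mneg, cur - minPre, cur - maxPre) dv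
        = (max mpos (cur + dv - minPre), min mneg (cur + dv - maxPre),
           (cur + dv) - min minPre (cur + dv), (cur + dv) - max maxPre (cur + dv)) := by
      simp only [stepA, Prod.mk.injEq]
      omega
    have hB : stepB (cur, minPre, maxPre, mpos, mneg) dv
        = (cur + dv, min minPre (cur + dv), max maxPre (cur + dv),
           max mpos (cur + dv - minPre), min mneg (cur + dv - maxPre)) := rfl
    rw [hA, hB]
    exact ih (max mpos (cur + dv - minPre)) (min mneg (cur + dv - maxPre)) (cur + dv)
      (min minPre (cur + dv)) (max maxPre (cur + dv))
      (by omega) (by omega) (by omega) (by omega)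

-- ===== VERDICT (by name: the statement is the Claim_ definition above) =====
theorem solution_1604_2_spec : Claim_equal_solution_1604_2 := by
  intro nums1 nums2 _ hpre
  show _ = _
  unfold solution_1604_2 solution_1604_2_alt
  simp only []
  rw [diff_eq nums1 nums2 hpre]
  set d := (nums1.zip nums2).map (fun ab => ab.1 - ab.2) with hd
  have hp : nums1.length ≤ nums2.length := hpre
  have hlen : PySem.List.len nums1 = (d.length : Int) := by
    rw [PySem.List.len_eq, hd]
    simp
    omega
  rw [hlen, PySem.List.foldl_pyRange_zero_pyGetD' d 0 stepA (0, 0, 0, 0)]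
  have key := loop_eq d 0 0 0 0 0 (le_refl 0) (le_refl 0) (le_refl 0) (le_refl 0)
  simp only [sub_zero] at key
  rw [show List.foldl (fun s ab => stepB s (ab.1 - ab.2)) ((0:Int), (0:Int), (0:Int), (0:Int), (0:Int)) (nums1.zip nums2)
        = List.foldl stepB (0, 0, 0, 0, 0) d from by rw [hd, List.foldl_map]]
  rw [key.1, key.2]
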